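-- pv_equiv track=rewrite | github.com/thamenato/advent-of-code | 2024/11-plutonian-pebbles/__main__.py | part_two
-- ===== SOURCE A (Python) =====
-- from dataclasses import dataclass
--
-- @dataclass
-- class Stone:
--     value: str
--     count: int
--
-- def _process_stone(stone):
--     if int(stone.value) == 0:
--         return [Stone("1", stone.count)]
--
--     if len(stone.value) % 2 == 0:
--         size = int(len(stone.value))
--         half = int(size / 2)
--         left = Stone(stone.value[:half], stone.count)
--         right = Stone(
--             str(int(stone.value[half:])), stone.count
--         )  # remove trailing zeroes
--         return [left, right]
--
--     value = Stone(str(int(stone.value) * 2024), stone.count)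
--     return [value]
--
-- def _process_blink(stone_list):
--     after_blink = []
--     for stone in stone_list:
--         after_blink += _process_stone(stone)
--
--     seen = {}
--     for stone in after_blink:
--         if stone.value in seen:
--             seen[stone.value] += stone.count
--         else:
--             seen[stone.value] = stone.count
--
--     return [Stone(k, v) for k, v in seen.items()]
--
-- def part_two(data):
--     blinks = 75
--
--     stone_list = [Stone(v, 1) for v in data.split()]
--     for i in range(0, blinks):
--         stone_list = _process_blink(stone_list)
--
--     total = 0
--     for stone in stone_list:
--         total += stone.count
--
--     return total
-- ===== SOURCE B (Python) =====
-- def part_two(data):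
--     # Depth-first memoized recursion over (value, remaining blinks) instead of
--     # A's breadth-first per-blink dict aggregation.
--     memo = {}
--
--     def solve(value, steps):
--         key = (value, steps)
--         if key in memo:
--             return memo[key]
--         if steps == 0:
--             res = 1
--         elif int(value) == 0:
--             res = solve("1", steps - 1)
--         elif len(value) % 2 == 0:
--             half = len(value) // 2
--             res = solve(value[:half], steps - 1) + solve(str(int(value[half:])), steps - 1)
--         else:
--             res = solve(str(int(value) * 2024), steps - 1)
--         memo[key] = res
--         return res
--
--     return sum(solve(v, 75) for v in data.split())
-- ===== Notes on version B (the rewrite author's own statement) =====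
-- stated objective: alternative
-- what changed: Replaces A's 75 breadth-first blink passes (expand every stone, then re-aggregate counts into a dict each pass) by a single memoized depth-first recursion solve(value, steps) over the (value, remaining-blinks) state space the sum of which is taken over the input tokens.
-- outside the precondition, e.g. on part_two('1_000'): A returns 17554152212358, B returns 17554152212358; on part_two('+0'): A returns 22938365706844, B returns 22938365706844
import Mathlib
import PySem

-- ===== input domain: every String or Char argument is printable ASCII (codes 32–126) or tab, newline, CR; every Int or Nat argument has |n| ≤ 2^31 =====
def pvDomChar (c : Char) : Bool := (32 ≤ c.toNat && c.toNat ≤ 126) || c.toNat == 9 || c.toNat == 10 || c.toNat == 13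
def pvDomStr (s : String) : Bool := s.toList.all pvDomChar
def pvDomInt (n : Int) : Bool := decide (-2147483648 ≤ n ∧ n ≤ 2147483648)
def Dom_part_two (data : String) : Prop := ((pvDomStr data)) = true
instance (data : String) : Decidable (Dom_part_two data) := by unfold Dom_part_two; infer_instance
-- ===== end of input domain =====

-- B replaces A's 75 breadth-first per-blink dict aggregations by a memoized depth-first
-- recursion over (value, remaining-blinks); equal return value on Pre_ (no mutation involved).

-- ===== PORT A =====
-- int(s); under Pre_ every value reaching int() is a digit string, so ofStr? is never none
-- (inputs making int() raise ValueError are excluded by Pre_; the getD default is unreachable there)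
def pvInt (s : String) : Int := (PySem.Int.ofStr? s).getD 0

-- _process_stone: a Stone is a (value, count) pair
def processStone (st : String × Int) : List (String × Int) :=
  if pvInt st.1 = 0 then [("1", st.2)]
  else if PySem.Int.mod (PySem.Str.len st.1) 2 = 0 then
    -- half = int(size / 2): size is even and small, so float division is exact = floor division
    let half : Int := PySem.Int.floordiv (PySem.Str.len st.1) 2
    [(PySem.Str.slice st.1 none (some half), st.2),
     (PySem.Int.toStr (pvInt (PySem.Str.slice st.1 (some half) none)), st.2)]
  else
    [(PySem.Int.toStr (pvInt st.1 * 2024), st.2)]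

-- _process_blink.  Python's 'seen' dict is ported as Std.TreeMap (a PySem.Dict association
-- list makes the 75-blink evaluation infeasible); the TreeMap iterates its entries sorted by
-- key instead of Python's insertion order, which only permutes the per-blink stone list — the
-- returned total is a sum over it and is order-independent (this is what the theorem proves).
def processBlink (L : List (String × Int)) : List (String × Int) :=
  let after := L.foldl (fun acc st => acc ++ processStone st) []
  let seen := after.foldl
    (fun (d : Std.TreeMap String Int compare) st =>
      if d.contains st.1 then d.insert st.1 (d.getD st.1 0 + st.2)
      else d.insert st.1 st.2) Std.TreeMap.empty
  seen.toList

def part_two (data : String) : Int :=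
  let stoneList := (PySem.Str.split₀ data).map (fun v => (v, (1 : Int)))
  let final := (PySem.List.pyRange 0 75).foldl (fun l _ => processBlink l) stoneList
  final.foldl (fun t st => t + st.2) 0

-- ===== PORT B =====
-- solve(value, steps) with the memo dict threaded through explicitly (steps is first so the
-- recursion is structural on it); the memo is keyed by (value, steps) as in Source B and is ported
-- as Std.HashMap — it is only ever looked up pointwise, never iterated, so no order is involved
def solveB (steps : Nat) (value : String) (memo : Std.HashMap (String × Nat) Int) :
    Int × Std.HashMap (String × Nat) Int :=
  match memo[(value, steps)]? with
  | some r => (r, memo)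
  | none =>
    match steps with
    | 0 => (1, memo.insert (value, 0) 1)
    | s+1 =>
      let p :=
        if pvInt value = 0 then solveB s "1" memo
        else if PySem.Int.mod (PySem.Str.len value) 2 = 0 then
          let half : Int := PySem.Int.floordiv (PySem.Str.len value) 2
          let l := solveB s (PySem.Str.slice value none (some half)) memo
          let r := solveB s (PySem.Int.toStr (pvInt (PySem.Str.slice value (some half) none))) l.2
          (l.1 + r.1, r.2)
        else solveB s (PySem.Int.toStr (pvInt value * 2024)) memo
      (p.1, p.2.insert (value, s+1) p.1)

-- sum(solve(v, 75) for v in data.split()), the memo shared across tokens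
def part_two_alt (data : String) : Int :=
  ((PySem.Str.split₀ data).foldl
    (fun (acc : Int × Std.HashMap (String × Nat) Int) v =>
      let r := solveB 75 v acc.2
      (acc.1 + r.1, r.2))
    (0, ∅)).1

-- ===== PRECONDITION & SPEC =====
-- Pre_ restricts to inputs whose whitespace-separated tokens are pure digit strings — the puzzle's
-- natural domain: on other int()-parseable tokens (e.g. '-2', '+5') A raises ValueError at a later
-- blink once a bare sign is split off, and whether a given such token crashes can only be decided by
-- running the blinks, so the closed-form Pre_ excludes them all; on the excluded tokens that do
-- return ('+0', '1_000') A and B agree (see the cites).  Both ports totalize int() with an unreachable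
-- default, so the proved equality actually holds for every string; Pre_'s role is purely to keep the
-- Python-side ValueError inputs out.
def Pre_part_two (data : String) : Prop :=
  ∀ t ∈ PySem.Str.split₀ data, PySem.Str.strIsdigit t = true
instance (data : String) : Decidable (Pre_part_two data) := by unfold Pre_part_two; infer_instance
def pvWitness_part_two : String := "125 17"

def Spec_part_two (data : String) (out : Int) : Prop := out = part_two_alt data
instance (data : String) (out : Int) : Decidable (Spec_part_two data out) := by unfold Spec_part_two; infer_instance

-- ===== CLAIM (what is proved, stated in full; the proofs are below) =====
def Claim_equal_part_two : Prop := ∀ (data : String), Dom_part_two data → Pre_part_two data → Spec_part_two data (part_two data)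

-- ===== LEMMAS AND PROOFS =====

-- the pure count "number of stones value v becomes after s blinks" (proof-side spec of B's solve)
def solveSpec : Nat → String → Int
  | 0, _ => 1
  | s+1, v =>
    if pvInt v = 0 then solveSpec s "1"
    else if PySem.Int.mod (PySem.Str.len v) 2 = 0 then
      let half : Int := PySem.Int.floordiv (PySem.Str.len v) 2
      solveSpec s (PySem.Str.slice v none (some half)) +
      solveSpec s (PySem.Int.toStr (pvInt (PySem.Str.slice v (some half) none)))
    else solveSpec s (PySem.Int.toStr (pvInt v * 2024))

-- weighted stone count: Σ count · solveSpec s value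
def Wt (s : Nat) (L : List (String × Int)) : Int :=
  (L.map (fun st => st.2 * solveSpec s st.1)).sum

lemma stone_sum (s : Nat) (v : String) (c : Int) :
    Wt s (processStone (v, c)) = c * solveSpec (s+1) v := by
  unfold Wt processStone
  show _ = c * solveSpec (s+1) v
  rw [solveSpec]
  split_ifs <;> simp <;> ring

-- in a list of pairs with pairwise-distinct keys, the entries at key k are exactly [(k, v)]
lemma filter_key_of_mem (l : List (String × Int)) (k : String) (v : Int)
    (hnd : (l.map Prod.fst).Nodup) (hmem : (k, v) ∈ l) :
    l.filter (fun p => k == p.1) = [(k, v)] := by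
  induction l with
  | nil => simp at hmem
  | cons p0 t ih =>
    simp only [List.map_cons, List.nodup_cons] at hnd
    rcases List.mem_cons.mp hmem with h0 | ht
    · subst h0
      rw [List.filter_cons_of_pos (by simp)]
      have hnil : t.filter (fun p => k == p.1) = [] := by
        rw [List.filter_eq_nil_iff]
        intro p hp hb
        exact hnd.1 (List.mem_map.mpr ⟨p, hp, (eq_of_beq hb).symm⟩)
      rw [hnil]
    · have hk : ¬ (k == p0.1) = true := by
        intro hb
        apply hnd.1
        refine List.mem_map.mpr ⟨(k, v), ht, ?_⟩
        exact eq_of_beq hb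
      have hk' : (k == p0.1) = false := by simpa using hk
      have hskip : List.filter (fun p => k == p.1) (p0 :: t)
          = List.filter (fun p => k == p.1) t := by
        simp [List.filter_cons, hk']
      rw [hskip, ih hnd.2 ht]

-- splitting a sum of mapped values along a Bool filter
lemma sum_map_split (l : List (String × Int)) (w : (String × Int) → Int)
    (p : (String × Int) → Bool) :
    (l.map w).sum = ((l.filter p).map w).sum + ((l.filter (fun x => !p x)).map w).sum := by
  induction l with
  | nil => simp
  | cons x t ih =>
    by_cases hx : p x = true
    · rw [List.filter_cons_of_pos hx, List.filter_cons_of_neg (by simp [hx])]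
      simp only [List.map_cons, List.sum_cons, ih]
      ring
    · rw [List.filter_cons_of_neg hx, List.filter_cons_of_pos (by simp [hx])]
      simp only [List.map_cons, List.sum_cons, ih]
      ring

-- the keys of a TreeMap's toList are pairwise distinct
lemma toList_keys_nodup (m : Std.TreeMap String Int compare) :
    (m.toList.map Prod.fst).Nodup := by
  rw [Std.TreeMap.map_fst_toList_eq_keys]
  have h := Std.TreeMap.distinct_keys (t := m)
  exact List.Pairwise.imp (fun hne heq => hne (by rw [heq]; exact Std.LawfulEqCmp.compare_eq_iff_eq.mpr rfl)) h

-- Σ over the dict's entries, weighted by solveSpec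
def Sd (s : Nat) (m : Std.TreeMap String Int compare) : Int :=
  (m.toList.map (fun p => p.2 * solveSpec s p.1)).sum

lemma Sd_insert (s : Nat) (m : Std.TreeMap String Int compare) (k : String) (c : Int) :
    Sd s (m.insert k (m.getD k 0 + c)) = Sd s m + c * solveSpec s k := by
  have hperm := Std.TreeMap.toList_insert_perm (t := m) (k := k) (v := m.getD k 0 + c)
  unfold Sd
  rw [(hperm.map (fun p => p.2 * solveSpec s p.1)).sum_eq]
  rw [sum_map_split m.toList _ (fun p => k == p.1)]
  have hfn : (fun x : String × Int => decide ¬(k == x.1) = true) = (fun x : String × Int => !(k == x.1)) := by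
    funext x
    by_cases hb : (k == x.1) = true <;> simp [hb]
  rw [List.map_cons, List.sum_cons, hfn]
  by_cases hc : m.contains k = true
  · have hs' : (m[k]?).isSome := by
      rw [← Std.TreeMap.contains_eq_isSome_getElem? (t := m) (a := k)]; exact hc
    obtain ⟨v, hv⟩ := Option.isSome_iff_exists.mp hs'
    have hmemt : k ∈ m := Std.TreeMap.mem_iff_contains.mpr hc
    have hmem : (k, v) ∈ m.toList :=
      Std.TreeMap.mem_toList_iff_getKey?_eq_some_and_getElem?_eq_some.mpr
        ⟨Std.TreeMap.getKey?_eq_some hmemt, hv⟩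
    rw [filter_key_of_mem m.toList k v (toList_keys_nodup m) hmem]
    have hgd : m.getD k 0 = v := by
      rw [Std.TreeMap.getD_eq_getD_getElem?, hv]; rfl
    rw [hgd]
    simp only [List.map_cons, List.map_nil, List.sum_cons, List.sum_nil]
    ring
  · have hnm : ¬ k ∈ m := fun hmem => hc (Std.TreeMap.mem_iff_contains.mp hmem)
    have hgd : m.getD k 0 = 0 := Std.TreeMap.getD_eq_fallback hnm
    have hnil : m.toList.filter (fun p => k == p.1) = [] := by
      rw [List.filter_eq_nil_iff]
      intro p hp hb
      apply hnm
      have : (p.1, p.2) ∈ m.toList := by simpa using hp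
      have := Std.TreeMap.mem_toList_iff_getKey?_eq_some_and_getElem?_eq_some.mp this
      rw [eq_of_beq hb]
      rw [Std.TreeMap.mem_iff_contains, Std.TreeMap.contains_eq_isSome_getElem?, this.2]
      rfl
    rw [hnil, hgd]
    simp only [List.map_nil, List.sum_nil]
    ring

lemma Sd_fold (s : Nat) (xs : List (String × Int)) :
    ∀ (d : Std.TreeMap String Int compare),
    Sd s (xs.foldl
      (fun (d : Std.TreeMap String Int compare) st =>
        if d.contains st.1 then d.insert st.1 (d.getD st.1 0 + st.2)
        else d.insert st.1 st.2) d)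
      = Sd s d + Wt s xs := by
  induction xs with
  | nil => intro d; simp [Wt]
  | cons x t ih =>
    intro d
    rw [List.foldl_cons]
    have hbody : (if d.contains x.1 then d.insert x.1 (d.getD x.1 0 + x.2)
        else d.insert x.1 x.2) = d.insert x.1 (d.getD x.1 0 + x.2) := by
      by_cases hc : d.contains x.1 = true
      · rw [if_pos hc]
      · rw [if_neg hc,
          Std.TreeMap.getD_eq_fallback (fun hm => hc (Std.TreeMap.mem_iff_contains.mp hm)),
          zero_add]
    rw [hbody, ih, Sd_insert]
    unfold Wt
    simp only [List.map_cons, List.sum_cons]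
    ring

lemma blink_Wt (s : Nat) (L : List (String × Int)) :
    Wt s (processBlink L) = Wt (s+1) L := by
  unfold processBlink
  rw [PySem.List.foldl_append_eq_flatMap, List.nil_append]
  have h1 : Wt s ((L.flatMap processStone).foldl
      (fun (d : Std.TreeMap String Int compare) st =>
        if d.contains st.1 then d.insert st.1 (d.getD st.1 0 + st.2)
        else d.insert st.1 st.2) Std.TreeMap.empty).toList
      = Wt s (L.flatMap processStone) := by
    show Sd s _ = _
    rw [Sd_fold]
    have : Sd s (Std.TreeMap.empty : Std.TreeMap String Int compare) = 0 := rfl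
    rw [this, zero_add]
  rw [h1]
  clear h1
  unfold Wt
  rw [List.map_flatMap]
  induction L with
  | nil => simp
  | cons st t ihL =>
    rw [List.flatMap_cons, List.sum_append, List.map_cons, List.sum_cons, ihL]
    congr 1
    have := stone_sum s st.1 st.2
    unfold Wt at this
    simpa using this

lemma iter_Wt (r : List Int) : ∀ (L : List (String × Int)) (s : Nat),
    Wt s (r.foldl (fun l _ => processBlink l) L) = Wt (s + r.length) L := by
  induction r with
  | nil => intro L s; simp
  | cons a t ih =>
    intro L s
    rw [List.foldl_cons, ih (processBlink L) s, blink_Wt, List.length_cons]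
    congr 1

lemma part_two_eq (data : String) :
    part_two data = ((PySem.Str.split₀ data).map (fun v => solveSpec 75 v)).sum := by
  unfold part_two
  rw [PySem.List.foldl_add (g := fun st : String × Int => st.2), zero_add]
  have h1 : ∀ (L : List (String × Int)), (L.map (fun st => st.2)).sum = Wt 0 L := by
    intro L; unfold Wt
    congr 1
    apply List.map_congr_left
    intro st _
    rw [solveSpec]
    ring
  rw [h1, iter_Wt]
  have hlen : (PySem.List.pyRange 0 75).length = 75 := by decide
  rw [hlen]
  unfold Wt
  rw [List.map_map]
  apply congrArg
  apply List.map_congr_left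
  intro v _
  simp

-- every value memoized so far is correct
def MemoOK (m : Std.HashMap (String × Nat) Int) : Prop :=
  ∀ v s r, m[(v, s)]? = some r → r = solveSpec s v

lemma memoOK_insert {m} (hm : MemoOK m) {v s r} (h : r = solveSpec s v) :
    MemoOK (m.insert (v, s) r) := by
  intro v' s' r' hget
  rw [Std.HashMap.getElem?_insert] at hget
  split_ifs at hget with he
  · have hpair : (v, s) = (v', s') := eq_of_beq he
    obtain ⟨hv, hs⟩ := Prod.mk.injEq .. ▸ hpair
    cases hget
    subst hv hs
    exact h
  · exact hm v' s' r' hget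

lemma solveB_ok : ∀ (s : Nat) (v : String) (m), MemoOK m →
    (solveB s v m).1 = solveSpec s v ∧ MemoOK (solveB s v m).2 := by
  intro s
  induction s with
  | zero =>
    intro v m hm
    rw [solveB]
    cases hg : m[(v, 0)]? with
    | some r => exact ⟨hm v 0 r hg, hm⟩
    | none =>
      refine ⟨rfl, ?_⟩
      exact memoOK_insert hm (by rw [solveSpec])
  | succ s ih =>
    intro v m hm
    rw [solveB]
    cases hg : m[(v, s + 1)]? with
    | some r => exact ⟨hm v (s+1) r hg, hm⟩
    | none =>
      simp only
      split_ifs with h0 h2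
      · have hv : solveSpec (s+1) v = solveSpec s "1" := by
          rw [solveSpec, if_pos h0]
        obtain ⟨h1, hmo⟩ := ih "1" m hm
        exact ⟨by rw [h1, hv], memoOK_insert hmo (by rw [h1, hv])⟩
      · have hv : solveSpec (s+1) v
            = solveSpec s (PySem.Str.slice v none (some (PySem.Int.floordiv (PySem.Str.len v) 2)))
              + solveSpec s (PySem.Int.toStr (pvInt (PySem.Str.slice v (some (PySem.Int.floordiv (PySem.Str.len v) 2)) none))) := by
          rw [solveSpec, if_neg h0, if_pos h2]
        obtain ⟨hl1, hl2⟩ := ih (PySem.Str.slice v none (some (PySem.Int.floordiv (PySem.Str.len v) 2))) m hm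
        obtain ⟨hr1, hr2⟩ := ih (PySem.Int.toStr (pvInt (PySem.Str.slice v (some (PySem.Int.floordiv (PySem.Str.len v) 2)) none))) _ hl2
        exact ⟨by rw [hl1, hr1, hv], memoOK_insert hr2 (by rw [hl1, hr1, hv])⟩
      · have hv : solveSpec (s+1) v = solveSpec s (PySem.Int.toStr (pvInt v * 2024)) := by
          rw [solveSpec, if_neg h0, if_neg h2]
        obtain ⟨h1, hmo⟩ := ih (PySem.Int.toStr (pvInt v * 2024)) m hm
        exact ⟨by rw [h1, hv], memoOK_insert hmo (by rw [h1, hv])⟩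

lemma part_two_alt_eq (data : String) :
    part_two_alt data = ((PySem.Str.split₀ data).map (fun v => solveSpec 75 v)).sum := by
  unfold part_two_alt
  have main : ∀ (ts : List String) (a : Int) (m), MemoOK m →
      ((ts.foldl
        (fun (acc : Int × Std.HashMap (String × Nat) Int) v =>
          let r := solveB 75 v acc.2
          (acc.1 + r.1, r.2)) (a, m))).1
        = a + (ts.map (fun v => solveSpec 75 v)).sum := by
    intro ts
    induction ts with
    | nil => intro a m _; simp
    | cons t tl ih =>
      intro a m hm
      rw [List.foldl_cons]
      obtain ⟨h1, h2⟩ := solveB_ok 75 t m hm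
      simp only
      rw [ih _ _ h2, h1, List.map_cons, List.sum_cons]
      ring
  have hempty : MemoOK (∅ : Std.HashMap (String × Nat) Int) := by
    intro v s r hget
    rw [Std.HashMap.getElem?_empty] at hget
    cases hget
  rw [main _ 0 _ hempty, zero_add]

-- ===== VERDICT (by name: the statement is the Claim_ definition above) =====
theorem part_two_spec : Claim_equal_part_two := by
  intro data _ _
  unfold Spec_part_two
  rw [part_two_eq, part_two_alt_eq]
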